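-- pv_equiv track=rewrite | github.com/mujingw/leetcode-daily | backtracking/411.py | get_len
-- ===== SOURCE A (Python) =====
-- def get_len(abbr):
--     count = 0
--
--     for i, ch in enumerate(abbr):
--         if i > 0 and abbr[i].isdigit() and abbr[i - 1].isdigit():
--             continue
--         else:
--             count += 1
--
--     return count
-- ===== SOURCE B (Python) =====
-- def get_len(abbr):
--     # Run-based scan: each maximal digit run counts as 1, each other char counts as 1.
--     count = 0
--     i = 0
--     n = len(abbr)
--     while i < n:
--         count += 1
--         if abbr[i].isdigit():
--             i += 1
--             while i < n and abbr[i].isdigit():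
--                 i += 1
--         else:
--             i += 1
--     return count
-- ===== Notes on version B (the rewrite author's own statement) =====
-- stated objective: alternative
-- what changed: Replaces the per-character lookback at index i-1 with a run-based scan that consumes each maximal digit run in one inner skip and counts it once.
import Mathlib
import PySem

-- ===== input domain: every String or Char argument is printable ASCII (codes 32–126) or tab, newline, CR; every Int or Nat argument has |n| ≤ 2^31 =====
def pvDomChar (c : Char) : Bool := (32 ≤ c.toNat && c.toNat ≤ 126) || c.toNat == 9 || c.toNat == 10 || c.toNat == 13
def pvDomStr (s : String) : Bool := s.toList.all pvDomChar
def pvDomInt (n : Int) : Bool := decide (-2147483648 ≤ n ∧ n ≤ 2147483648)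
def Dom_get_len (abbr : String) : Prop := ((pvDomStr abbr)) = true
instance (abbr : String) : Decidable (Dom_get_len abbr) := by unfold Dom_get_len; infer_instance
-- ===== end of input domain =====

-- B replaces A's per-character lookback (abbr[i-1]) with a run-based scan that
-- consumes each maximal digit run at once and counts it as one; same cost, different traversal.

-- ===== PORT A =====
-- literal port of A: enumerate the string, skip a char whose predecessor and itself are digits
def get_len (abbr : String) : Int :=
  let cs := abbr.toList
  (PySem.List.enumerate cs 0).foldl
    (fun count p =>
      if p.1 > 0
          && ((PySem.List.pyGet? cs p.1).map PySem.Chars.isdigit).getD false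
          && ((PySem.List.pyGet? cs (p.1 - 1)).map PySem.Chars.isdigit).getD false
      then count
      else count + 1) 0

-- ===== PORT B =====
-- port of Source B's outer while loop: one recursive step per run head; the inner
-- digit-skipping while loop is the dropWhile over the rest of the list
def getLenRuns : List Char → Int
  | [] => 0
  | c :: rest =>
    if PySem.Chars.isdigit c then 1 + getLenRuns (rest.dropWhile PySem.Chars.isdigit)
    else 1 + getLenRuns rest
  termination_by cs => cs.length
  decreasing_by
    · have := (List.dropWhile_sublist (l := rest) (p := PySem.Chars.isdigit)).length_le
      simp; omega
    · simp

def get_len_alt (abbr : String) : Int := getLenRuns abbr.toList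

-- ===== PRECONDITION & SPEC =====
def Spec_get_len (abbr : String) (out : Int) : Prop := out = get_len_alt abbr
instance (abbr : String) (out : Int) : Decidable (Spec_get_len abbr out) := by unfold Spec_get_len; infer_instance

-- ===== CLAIM (what is proved, stated in full; the proofs are below) =====
def Claim_equal_get_len : Prop := ∀ (abbr : String), Dom_get_len abbr → Spec_get_len abbr (get_len abbr)

-- ===== LEMMAS AND PROOFS =====

-- A's loop rephrased as a recursion carrying "was the previous char a digit"
def goA (prev : Bool) : List Char → Int
  | [] => 0
  | c :: rest => (if prev && PySem.Chars.isdigit c then 0 else 1) + goA (PySem.Chars.isdigit c) rest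

lemma foldA (cs : List Char) : ∀ suf pre acc, cs = pre ++ suf →
    (PySem.List.enumerate suf (pre.length : Int)).foldl
      (fun count p =>
        if p.1 > 0
            && ((PySem.List.pyGet? cs p.1).map PySem.Chars.isdigit).getD false
            && ((PySem.List.pyGet? cs (p.1 - 1)).map PySem.Chars.isdigit).getD false
        then count
        else count + 1) acc
      = acc + goA ((pre.getLast?.map PySem.Chars.isdigit).getD false) suf := by
  intro suf
  induction suf with
  | nil => intro pre acc _; simp [goA]
  | cons c rest ih =>
    intro pre acc hcs
    rw [PySem.List.enumerate_cons]
    simp only [List.foldl_cons]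
    have hget : PySem.List.pyGet? cs (pre.length : Int) = some c := by
      rw [hcs]; exact PySem.List.pyGet?_append_length _ _ _
    have hstep : ((pre.length : Int) + 1) = ((pre ++ [c]).length : Int) := by
      simp
    have hrec := fun a => ih (pre ++ [c]) a (by rw [hcs]; simp)
    rw [hstep]
    cases pre with
    | nil =>
      simp only [List.length_nil, Int.natCast_zero] at *
      rw [hrec]
      simp only [hget, Option.map_some, Option.getD_some]
      simp [goA]
      omega
    | cons p ps =>
      have hpos : decide (((p :: ps).length : Int) > 0) = true := by
        simp only [decide_eq_true_eq, List.length_cons]; positivity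
      have hne : p :: ps ≠ [] := by simp
      have hprev : PySem.List.pyGet? cs (((p :: ps).length : Int) - 1) =
          some ((p :: ps).getLast hne) := by
        rw [hcs]
        have h1 : (((p :: ps).length : Int) - 1) = (((p :: ps).length - 1 : Nat) : Int) := by
          simp only [List.length_cons]; omega
        rw [h1, PySem.List.pyGet?_natCast]
        rw [List.getElem?_append_left (by simp only [List.length_cons]; omega)]
        rw [List.getElem?_eq_getElem (by simp only [List.length_cons]; omega)]
        simp [List.getLast_eq_getElem]
      have hlast : (p :: ps).getLast? = some ((p :: ps).getLast hne) :=
        List.getLast?_eq_some_getLast hne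
      rw [hrec, hget, hprev]
      simp only [goA, List.getLast?_concat, hlast, Option.map_some, Option.getD_some,
        hpos, Bool.true_and]
      split <;> split <;> simp_all [Bool.and_comm] <;> omega

-- joint characterisation of B against goA
lemma goA_eq_runs (cs : List Char) :
    goA false cs = getLenRuns cs ∧
      goA true cs = getLenRuns (cs.dropWhile PySem.Chars.isdigit) := by
  induction cs with
  | nil => simp [goA, getLenRuns]
  | cons c rest ih =>
    obtain ⟨ihf, iht⟩ := ih
    cases h : PySem.Chars.isdigit c with
    | true =>
      refine ⟨?_, ?_⟩
      · simp [goA, getLenRuns, h, iht]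
      · simp [goA, h, iht]
    | false =>
      refine ⟨?_, ?_⟩
      · simp [goA, getLenRuns, h, ihf]
      · simp [goA, getLenRuns, h, ihf]

-- ===== VERDICT (by name: the statement is the Claim_ definition above) =====
theorem get_len_spec : Claim_equal_get_len := by
  unfold Claim_equal_get_len Spec_get_len get_len get_len_alt
  intro abbr _
  have h := foldA abbr.toList abbr.toList [] 0 (by simp)
  simp only [List.length_nil, Int.natCast_zero] at h
  rw [h]
  simp [(goA_eq_runs abbr.toList).1]
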